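-- pv_equiv track=rewrite | github.com/ramuponugumati/cloudpilot | cloudpilot/skills/arch_mapper.py | _view_default
-- ===== SOURCE A (Python) =====
-- ICONS = {
--     "ec2": "🖥️", "rds": "🗄️", "lambda": "⚡", "s3": "📦",
--     "ecs": "🐳", "vpc": "🌐", "dynamodb": "📊", "sqs": "📬",
--     "sns": "📢", "apigateway": "🚪", "cloudfront": "🌍", "elb": "⚖️",
--     "subnet": "🔲", "nat_gateway": "🔀", "igw": "🚪",
-- }
--
-- LAYER_ORDER = ["Edge", "Load_Balancing", "Compute", "Data", "Storage", "Networking", "Security", "Messaging"]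
--
-- def _view_default(resources: list[dict], connections: list[dict]) -> str:
--     """Mind-map style architecture overview — layers → services → resource counts."""
--     lines = ["mindmap"]
--     lines.append("  root((☁️ AWS Architecture))")
--
--     # Group by layer, then by service
--     by_layer: dict[str, dict[str, list[dict]]] = {}
--     for r in resources:
--         layer = r.get("layer", "Other")
--         svc = r.get("service", "other")
--         by_layer.setdefault(layer, {}).setdefault(svc, []).append(r)
--
--     for layer in LAYER_ORDER:
--         services = by_layer.get(layer, {})
--         if not services:
--             continue
--         total = sum(len(v) for v in services.values())
--         layer_label = layer.replace("_", " ")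
--         lines.append(f"    {layer_label}")
--         for svc, items in sorted(services.items(), key=lambda x: -len(x[1])):
--             icon = ICONS.get(svc, "📎")
--             count = len(items)
--             # Show service with count and top 3 named resources
--             lines.append(f"      {icon} {svc.upper()} x{count}")
--             named = [r.get("name") or r.get("id", "") for r in items if r.get("name")][:3]
--             for n in named:
--                 clean = n[:20].replace("(", "").replace(")", "").replace('"', "")
--                 lines.append(f"        {clean}")
--
--     return "\n".join(lines)
-- ===== SOURCE B (Python) =====
-- ICONS = {
--     "ec2": "🖥️", "rds": "🗄️", "lambda": "⚡", "s3": "📦",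
--     "ecs": "🐳", "vpc": "🌐", "dynamodb": "📊", "sqs": "📬",
--     "sns": "📢", "apigateway": "🚪", "cloudfront": "🌍", "elb": "⚖️",
--     "subnet": "🔲", "nat_gateway": "🔀", "igw": "🚪",
-- }
--
-- LAYER_ORDER = ["Edge", "Load_Balancing", "Compute", "Data", "Storage", "Networking", "Security", "Messaging"]
--
-- def _view_default(resources: list[dict], connections: list[dict]) -> str:
--     """Mind-map architecture overview, driven by LAYER_ORDER with a per-layer scan."""
--     def block(layer: str) -> list[str]:
--         rs = [r for r in resources if r.get("layer", "Other") == layer]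
--         if not rs:
--             return []
--         order = list(dict.fromkeys(r.get("service", "other") for r in rs))
--         groups = sorted(
--             [(s, [r for r in rs if r.get("service", "other") == s]) for s in order],
--             key=lambda p: -len(p[1]),
--         )
--         return ["    " + layer.replace("_", " ")] + [
--             line
--             for svc, items in groups
--             for line in [f"      {ICONS.get(svc, '📎')} {svc.upper()} x{len(items)}"]
--             + [
--                 "        " + n[:20].replace("(", "").replace(")", "").replace('"', "")
--                 for n in [r.get("name") for r in items if r.get("name")][:3]
--             ]
--         ]
--
--     return "\n".join(
--         ["mindmap", "  root((☁️ AWS Architecture))"]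
--         + [line for layer in LAYER_ORDER for line in block(layer)]
--     )
-- ===== Notes on version B (the rewrite author's own statement) =====
-- stated objective: alternative
-- what changed: B drops A's pre-built nested layer->service dict entirely and instead iterates LAYER_ORDER, per layer filtering the resource list, ordered-deduping its services and grouping/sorting them, emitting blocks as comprehensions joined once at the end.
import Mathlib
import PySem

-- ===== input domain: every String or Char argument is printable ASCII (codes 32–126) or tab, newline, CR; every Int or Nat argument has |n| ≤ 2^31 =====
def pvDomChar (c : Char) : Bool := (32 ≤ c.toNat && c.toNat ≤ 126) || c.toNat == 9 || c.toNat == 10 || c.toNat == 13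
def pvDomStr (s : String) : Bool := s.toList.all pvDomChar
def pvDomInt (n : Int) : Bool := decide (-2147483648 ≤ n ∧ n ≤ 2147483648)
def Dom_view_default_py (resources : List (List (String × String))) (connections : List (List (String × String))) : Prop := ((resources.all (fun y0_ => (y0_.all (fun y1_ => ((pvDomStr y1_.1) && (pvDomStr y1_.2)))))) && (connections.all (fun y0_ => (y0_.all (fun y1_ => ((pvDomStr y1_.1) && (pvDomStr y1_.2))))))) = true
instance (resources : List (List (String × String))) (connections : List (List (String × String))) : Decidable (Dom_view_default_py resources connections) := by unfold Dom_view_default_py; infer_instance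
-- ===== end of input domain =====

-- B replaces A's pre-built nested layer→service dict by an outer loop over LAYER_ORDER with a
-- per-layer scan (filter, ordered dedup of services, group, sort) emitted as comprehensions
-- joined at the end; objective: alternative decomposition, same results.

-- shared helpers: the Python dict lookups r.get(...) both programs perform
def rLayer (r : List (String × String)) : String := (PySem.Dict.mk r).getD "layer" "Other"
def rSvc (r : List (String × String)) : String := (PySem.Dict.mk r).getD "service" "other"
def rName (r : List (String × String)) : Option String := (PySem.Dict.mk r).get? "name"
-- Python truthiness of r.get("name") (None or "" are falsy)
def truthyName (r : List (String × String)) : Bool := (rName r).getD "" != ""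
-- n[:20].replace("(", "").replace(")", "").replace('"', "")
def cleanName (n : String) : String :=
  PySem.Str.replace (PySem.Str.replace (PySem.Str.replace (PySem.Str.slice n none (some 20)) "(" "") ")" "") "\"" ""

def ICONS : PySem.Dict String String := PySem.Dict.ofList [("ec2", "🖥️"), ("rds", "🗄️"), ("lambda", "⚡"), ("s3", "📦"), ("ecs", "🐳"), ("vpc", "🌐"), ("dynamodb", "📊"), ("sqs", "📬"), ("sns", "📢"), ("apigateway", "🚪"), ("cloudfront", "🌍"), ("elb", "⚖️"), ("subnet", "🔲"), ("nat_gateway", "🔀"), ("igw", "🚪")]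

def LAYER_ORDER : List String := ["Edge", "Load_Balancing", "Compute", "Data", "Storage", "Networking", "Security", "Messaging"]

-- ===== PORT A =====
-- r.get("name") or r.get("id", "")
def nameOrId (r : List (String × String)) : String :=
  let n := (rName r).getD ""
  if n ≠ "" then n else (PySem.Dict.mk r).getD "id" ""

def view_default_py (resources : List (List (String × String))) (connections : List (List (String × String))) : String :=
  let lines : List String := ["mindmap"]
  let lines := lines ++ ["  root((☁️ AWS Architecture))"]
  -- by_layer.setdefault(layer, {}).setdefault(svc, []).append(r): both setdefault-and-mutate
  -- steps are written out as get-with-default followed by a re-insert at the same key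
  let byLayer : PySem.Dict String (PySem.Dict String (List (List (String × String)))) :=
    resources.foldl (fun d r =>
      d.insert (rLayer r) ((d.getD (rLayer r) PySem.Dict.empty).modify (rSvc r) [] (fun its => its ++ [r])))
      PySem.Dict.empty
  let lines := LAYER_ORDER.foldl (fun lines layer =>
    let services := byLayer.getD layer PySem.Dict.empty
    if services.items = [] then lines
    else
      -- A's `total` is computed but never used; it is omitted here
      let lines := lines ++ ["    " ++ PySem.Str.replace layer "_" " "]
      (PySem.List.sorted services.items (fun x => -(x.2.length : Int)) false).foldl (fun lines p =>
        let lines := lines ++ ["      " ++ ICONS.getD p.1 "📎" ++ " " ++ PySem.Str.upper p.1 ++ " x" ++ PySem.Int.toStr (p.2.length : Int)]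
        (((p.2.filter truthyName).map nameOrId).take 3).foldl (fun lines n =>
          lines ++ ["        " ++ cleanName n]) lines) lines) lines
  PySem.Str.join "\n" lines

-- ===== PORT B =====
def view_default_py_alt (resources : List (List (String × String))) (connections : List (List (String × String))) : String :=
  let block : String → List String := fun layer =>
    let rs := resources.filter (fun r => rLayer r == layer)
    if rs = [] then []
    else
      let order := PySem.List.dedup (rs.map rSvc)
      let groups := PySem.List.sorted (order.map (fun s => (s, rs.filter (fun r => rSvc r == s))))
        (fun p => -(p.2.length : Int)) false
      ("    " ++ PySem.Str.replace layer "_" " ") ::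
        groups.flatMap (fun p =>
          ("      " ++ ICONS.getD p.1 "📎" ++ " " ++ PySem.Str.upper p.1 ++ " x" ++ PySem.Int.toStr (p.2.length : Int)) ::
            (((p.2.filter truthyName).map (fun r => (rName r).getD "")).take 3).map (fun n => "        " ++ cleanName n))
  PySem.Str.join "\n" (["mindmap", "  root((☁️ AWS Architecture))"] ++ LAYER_ORDER.flatMap block)

-- ===== PRECONDITION & SPEC =====
def Spec_view_default_py (resources : List (List (String × String))) (connections : List (List (String × String))) (out : String) : Prop := out = view_default_py_alt resources connections
instance (resources : List (List (String × String))) (connections : List (List (String × String))) (out : String) : Decidable (Spec_view_default_py resources connections out) := by unfold Spec_view_default_py; infer_instance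

-- ===== CLAIM (what is proved, stated in full; the proofs are below) =====
def Claim_equal_view_default_py : Prop := ∀ (resources : List (List (String × String))) (connections : List (List (String × String))), Dom_view_default_py resources connections → Spec_view_default_py resources connections (view_default_py resources connections)

-- ===== LEMMAS AND PROOFS =====

-- grouping: a fold of re-inserts at key `key x` read back at key c is a fold over the matching x
theorem getD_foldl_insert_group {α ν : Type} (l : List α) (key : α → String) (d0 : ν)
    (f : α → ν → ν) (d : PySem.Dict String ν) (c : String) :
    (l.foldl (fun d x => d.insert (key x) (f x (d.getD (key x) d0))) d).getD c d0
    = (l.filter (fun x => key x == c)).foldl (fun v x => f x v) (d.getD c d0) := by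
  induction l generalizing d with
  | nil => rfl
  | cons x t ih =>
    simp only [List.foldl_cons, List.filter_cons, ih]
    by_cases h : key x = c
    · simp [h]
    · have hc : ¬ c = key x := fun hc => h hc.symm
      simp [PySem.Dict.getD_insert, hc, h]

-- the inner Dict String (List resource) a layer accumulates in A
def innerOf (rs : List (List (String × String))) : PySem.Dict String (List (List (String × String))) :=
  rs.foldl (fun inner r => inner.modify (rSvc r) [] (fun its => its ++ [r])) PySem.Dict.empty

-- reading A's by_layer at a layer = grouping the per-layer filtered resources by service
theorem getD_byLayer (res : List (List (String × String))) (layer : String) :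
    (res.foldl (fun d r =>
        d.insert (rLayer r) ((d.getD (rLayer r) PySem.Dict.empty).modify (rSvc r) [] (fun its => its ++ [r])))
        PySem.Dict.empty).getD layer PySem.Dict.empty
    = innerOf (res.filter (fun r => rLayer r == layer)) := by
  have h := getD_foldl_insert_group res rLayer PySem.Dict.empty
    (fun r inner => inner.modify (rSvc r) [] (fun its => its ++ [r])) PySem.Dict.empty layer
  simpa [innerOf, PySem.Dict.getD_empty] using h

-- the items of that inner dict: services in first-appearance order with their item groups
theorem inner_items (rs : List (List (String × String))) :
    (innerOf rs).items
    = (PySem.List.dedup (rs.map rSvc)).map (fun s => (s, rs.filter (fun r => rSvc r == s))) := by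
  have hnd : (innerOf rs).keys.Nodup := by
    have := PySem.Dict.nodup_keys_foldl_modify_key rs rSvc [] (fun _ r its => its ++ [r])
      PySem.Dict.empty PySem.Dict.nodup_keys_empty
    simpa [innerOf] using this
  have hkeys : (innerOf rs).keys = PySem.List.dedup (rs.map rSvc) := by
    have := PySem.Dict.keys_foldl_modify_key rs rSvc [] (fun _ r its => its ++ [r]) PySem.Dict.empty
    simpa [innerOf, PySem.Set.update, PySem.List.dedup, PySem.Set.ofList_eq_foldl] using this
  have hget : ∀ s, (innerOf rs).getD s [] = rs.filter (fun r => rSvc r == s) := by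
    intro s
    have h := getD_foldl_insert_group rs rSvc [] (fun r its => its ++ [r]) PySem.Dict.empty s
    unfold innerOf
    simp only [PySem.Dict.modify]
    rw [h, PySem.Dict.getD_empty]
    simpa using PySem.List.foldl_append_singleton_eq_self (rs.filter fun r => rSvc r == s) []
  rw [PySem.Dict.items_eq_map_keys _ hnd [], hkeys]
  exact List.map_congr_left (fun s _ => by rw [hget s])

-- a truthy name makes `r.get("name") or r.get("id", "")` return the name
theorem nameOrId_of_truthy (r : List (String × String)) (h : truthyName r = true) :
    nameOrId r = (rName r).getD "" := by
  unfold truthyName at h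
  unfold nameOrId
  simp only [bne_iff_ne, ne_eq] at h
  simp [h]

-- A's inner loop over the top-3 names appends single lines: it is an append of a map
-- A's service loop appends a header line plus those name lines per service pair
theorem svcFold (l : List (String × List (List (String × String)))) (acc : List String) :
    l.foldl (fun lines p =>
      (((p.2.filter truthyName).map nameOrId).take 3).foldl (fun lines n =>
        lines ++ ["        " ++ cleanName n])
        (lines ++ ["      " ++ ICONS.getD p.1 "📎" ++ " " ++ PySem.Str.upper p.1 ++ " x" ++ PySem.Int.toStr (p.2.length : Int)])) acc
    = acc ++ l.flatMap (fun p =>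
        ("      " ++ ICONS.getD p.1 "📎" ++ " " ++ PySem.Str.upper p.1 ++ " x" ++ PySem.Int.toStr (p.2.length : Int)) ::
          (((p.2.filter truthyName).map nameOrId).take 3).map (fun n => "        " ++ cleanName n)) := by
  induction l generalizing acc with
  | nil => simp
  | cons p t ih =>
    rw [List.foldl_cons, PySem.List.foldl_append_singleton_eq_map, ih]
    simp

-- a fold whose step appends a block is an append of the flatMap of the blocks
theorem foldl_eq_append_flatMap {α β : Type} (f : List β → α → List β) (g : α → List β)
    (l : List α) (acc : List β) (h : ∀ acc x, f acc x = acc ++ g x) :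
    l.foldl f acc = acc ++ l.flatMap g := by
  exact (PySem.List.foldl_congr_mem l f (fun acc x => acc ++ g x) acc (fun acc x _ => h acc x)).trans
    (PySem.List.foldl_append_eq_flatMap g l acc)

-- A's whole per-layer contribution, after the fold rewrites
def blockA (res : List (List (String × String))) (layer : String) : List String :=
  if (innerOf (res.filter (fun r => rLayer r == layer))).items = [] then []
  else ("    " ++ PySem.Str.replace layer "_" " ") ::
    (PySem.List.sorted (innerOf (res.filter (fun r => rLayer r == layer))).items
      (fun x => -(x.2.length : Int)) false).flatMap (fun p =>
        ("      " ++ ICONS.getD p.1 "📎" ++ " " ++ PySem.Str.upper p.1 ++ " x" ++ PySem.Int.toStr (p.2.length : Int)) ::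
          (((p.2.filter truthyName).map nameOrId).take 3).map (fun n => "        " ++ cleanName n))

-- A's loop over LAYER_ORDER appends one block per layer
theorem layerFold (res : List (List (String × String))) (acc : List String) :
    LAYER_ORDER.foldl (fun lines layer =>
      if (innerOf (res.filter (fun r => rLayer r == layer))).items = [] then lines
      else (lines ++ ["    " ++ PySem.Str.replace layer "_" " "]) ++
        (PySem.List.sorted (innerOf (res.filter (fun r => rLayer r == layer))).items
          (fun x => -(x.2.length : Int)) false).flatMap (fun p =>
            ("      " ++ ICONS.getD p.1 "📎" ++ " " ++ PySem.Str.upper p.1 ++ " x" ++ PySem.Int.toStr (p.2.length : Int)) ::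
              (((p.2.filter truthyName).map nameOrId).take 3).map (fun n => "        " ++ cleanName n))) acc
    = acc ++ LAYER_ORDER.flatMap (blockA res) := by
  apply foldl_eq_append_flatMap
  intro acc layer
  unfold blockA
  by_cases h : (innerOf (res.filter (fun r => rLayer r == layer))).items = []
  · simp [h]
  · simp [h]

theorem view_default_py_spec : Claim_equal_view_default_py := by
  unfold Claim_equal_view_default_py
  intro res conns _
  unfold Spec_view_default_py
  simp only [view_default_py, view_default_py_alt]
  simp only [getD_byLayer, svcFold]
  rw [layerFold]
  refine congrArg (PySem.Str.join "\n") ?_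
  simp only [List.cons_append, List.nil_append, List.cons.injEq, true_and]
  refine congrArg (fun f => List.flatMap f LAYER_ORDER) (funext fun layer => ?_)
  rw [blockA, inner_items]
  have hmap : ∀ (items : List (List (String × String))),
      (items.filter truthyName).map nameOrId
      = (items.filter truthyName).map (fun r => (rName r).getD "") :=
    fun items => List.map_congr_left (fun r hr => nameOrId_of_truthy r (List.mem_filter.mp hr).2)
  by_cases h : res.filter (fun r => rLayer r == layer) = []
  · simp [h]
  · have hne : PySem.Set.ofList ((res.filter (fun r => rLayer r == layer)).map rSvc) ≠ [] := by
      obtain ⟨r, t, hrt⟩ := List.exists_cons_of_ne_nil h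
      refine List.ne_nil_of_mem (a := rSvc r) ((PySem.Set.mem_ofList _ _).mpr ?_)
      simp [hrt]
    simp [h, hne, hmap]
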